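-- pv_equiv track=rewrite | github.com/hivdb/GenBankRefs | Alignment.py | get_pos_post
-- ===== SOURCE A (Python) =====
-- def get_pos_post(str, char):
--     pos = len(str)
--     for c in str[::-1]:
--         if c == char:
--             pos -= 1
--         else:
--             break
--     return pos
-- ===== SOURCE B (Python) =====
-- def get_pos_post(str, char):
--     pos = 0
--     for i, c in enumerate(str):
--         if c != char:
--             pos = i + 1
--     return pos
-- ===== Notes on version B (the rewrite author's own statement) =====
-- stated objective: alternative
-- what changed: Replaces A's reverse scan with early break by a single forward pass keeping an accumulator: pos is reset to i+1 at every mismatching character, so the returned value is the start of the trailing run.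
import Mathlib
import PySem

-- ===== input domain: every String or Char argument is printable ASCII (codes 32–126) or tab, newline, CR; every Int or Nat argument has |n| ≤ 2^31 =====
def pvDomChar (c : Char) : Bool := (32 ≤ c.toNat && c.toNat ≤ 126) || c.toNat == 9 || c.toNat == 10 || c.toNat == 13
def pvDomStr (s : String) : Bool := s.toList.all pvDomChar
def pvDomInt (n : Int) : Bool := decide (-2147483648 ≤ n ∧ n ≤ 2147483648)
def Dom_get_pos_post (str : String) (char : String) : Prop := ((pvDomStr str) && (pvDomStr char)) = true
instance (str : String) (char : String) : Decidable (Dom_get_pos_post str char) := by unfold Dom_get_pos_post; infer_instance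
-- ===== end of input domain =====

-- B replaces A's reverse scan with early break by a single forward pass that resets an
-- accumulator at every mismatching character (objective: alternative decomposition).

-- Python's `c == char` / `c != char`, c a single character of the scanned string.
def pvMatch (c : Char) (char : String) : Bool := String.singleton c == char

-- ===== PORT A =====
-- `for c in str[::-1]: if c == char: pos -= 1 else: break`
def pvALoop (char : String) : List Char → Int → Int
  | [], pos => pos
  | c :: rest, pos => if pvMatch c char then pvALoop char rest (pos - 1) else pos

def get_pos_post (str : String) (char : String) : Int :=
  pvALoop char str.toList.reverse (str.toList.length : Int)

-- ===== PORT B =====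
-- `for i, c in enumerate(str): if c != char: pos = i + 1`
def pvBStep (char : String) (pos : Int) (ic : Int × Char) : Int :=
  if ! pvMatch ic.2 char then ic.1 + 1 else pos

def get_pos_post_alt (str : String) (char : String) : Int :=
  (PySem.List.enumerate str.toList).foldl (pvBStep char) 0

-- ===== PRECONDITION & SPEC =====
def Spec_get_pos_post (str : String) (char : String) (out : Int) : Prop := out = get_pos_post_alt str char
instance (str : String) (char : String) (out : Int) : Decidable (Spec_get_pos_post str char out) := by unfold Spec_get_pos_post; infer_instance

-- ===== CLAIM (what is proved, stated in full; the proofs are below) =====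
def Claim_equal_get_pos_post : Prop := ∀ (str : String) (char : String), Dom_get_pos_post str char → Spec_get_pos_post str char (get_pos_post str char)

-- ===== LEMMAS AND PROOFS =====

-- Core fact, by reverse (snoc) induction on the character list.
theorem pvLoop_eq (char : String) (l : List Char) :
    pvALoop char l.reverse (l.length : Int) = (PySem.List.enumerate l).foldl (pvBStep char) 0 := by
  induction l using List.reverseRecOn with
  | nil => rfl
  | append_singleton l c ih =>
    rw [List.reverse_append, List.reverse_singleton, List.singleton_append,
        PySem.List.enumerate_append]
    simp only [List.length_append, List.length_singleton, List.foldl_append,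
      PySem.List.enumerate_cons, PySem.List.enumerate_nil, List.foldl]
    by_cases h : pvMatch c char = true
    · have hlen : ((l.length + 1 : Nat) : Int) - 1 = (l.length : Int) := by push_cast; ring
      simp only [pvALoop, h, if_true, pvBStep, Bool.not_true, Bool.false_eq_true, if_false]
      rw [Nat.cast_add, Nat.cast_one, add_sub_cancel_right]
      exact ih
    · simp [pvALoop, h, pvBStep]

-- ===== VERDICT (by name: the statement is the Claim_ definition above) =====
theorem get_pos_post_spec : Claim_equal_get_pos_post := by
  intro str char _
  unfold Spec_get_pos_post get_pos_post get_pos_post_alt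
  exact pvLoop_eq char str.toList
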